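-- pv_equiv track=rewrite | github.com/96Jack/OD_interview_question | 牛客/HJ22.py | func
-- ===== SOURCE A (Python) =====
-- def func(a,b):
--     sum = a + b
--     c, d = sum//3, sum%3
--     if c+d == 2 or c+d == 3:
--         return sum + 1
--     elif c+d > 3:
--         return func(b, c)
--     else:
--         return 0
-- ===== SOURCE B (Python) =====
-- def func(a, b):
--     # Iterative loop; the stopping test is precomputed as direct ranges of the
--     # bottle sum s: s in {2,4,5,6,7,9} terminates with s+1, s == 8 or s >= 10
--     # exchanges and loops, anything else yields 0.
--     while True:
--         s = a + b
--         if s == 2 or 4 <= s <= 7 or s == 9: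
--             return s + 1
--         if s == 8 or s >= 10:
--             a, b = b, s // 3
--         else:
--             return 0
-- ===== Notes on version B (the rewrite author's own statement) =====
-- stated objective: alternative
-- what changed: Tail recursion replaced by an explicit while-True loop over the (a, b) state, and the c+d branch tests (c=sum//3, d=sum%3) are replaced by equivalent direct range tests on the sum itself (s in {2,4,5,6,7,9} terminates, s==8 or s>=10 exchanges and loops, else 0).
import Mathlib
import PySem

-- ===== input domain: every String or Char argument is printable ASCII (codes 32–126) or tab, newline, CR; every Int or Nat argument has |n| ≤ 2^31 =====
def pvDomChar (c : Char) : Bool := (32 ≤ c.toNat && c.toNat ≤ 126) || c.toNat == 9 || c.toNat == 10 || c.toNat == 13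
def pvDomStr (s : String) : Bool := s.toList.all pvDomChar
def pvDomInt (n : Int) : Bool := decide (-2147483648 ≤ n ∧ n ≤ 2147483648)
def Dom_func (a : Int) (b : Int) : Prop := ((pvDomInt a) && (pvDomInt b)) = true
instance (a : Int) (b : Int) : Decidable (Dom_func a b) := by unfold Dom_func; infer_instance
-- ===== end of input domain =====

-- B replaces A's tail recursion on (b, sum//3) by an explicit while-loop over the
-- state and precomputes the c+d branch tests as direct ranges of the sum
-- (objective: alternative decomposition; no speed claim).
-- Fuel (200) only makes the shared recurrence total in Lean; the depth on the
-- stated domain is far below it.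

-- ===== PORT A =====
-- A: tail recursion; each call computes c = sum//3, d = sum%3 and branches on c+d.
def funcGo : Nat → Int → Int → Int
  | 0, _, _ => 0
  | n+1, a, b =>
    let sum := a + b
    let c := PySem.Int.floordiv sum 3
    let d := PySem.Int.mod sum 3
    if c + d = 2 ∨ c + d = 3 then sum + 1
    else if c + d > 3 then funcGo n b c
    else 0

def func (a : Int) (b : Int) : Int := funcGo 200 a b

-- ===== PORT B =====
-- B: while-True loop over the pair (a, b), branching directly on ranges of s.
def funcLoop : Nat → Int × Int → Int
  | 0, _ => 0
  | n+1, (a, b) =>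
    let s := a + b
    if s = 2 ∨ (4 ≤ s ∧ s ≤ 7) ∨ s = 9 then s + 1
    else if s = 8 ∨ s ≥ 10 then funcLoop n (b, PySem.Int.floordiv s 3)
    else 0

def func_alt (a : Int) (b : Int) : Int := funcLoop 200 (a, b)

-- ===== PRECONDITION & SPEC =====
def Spec_func (a : Int) (b : Int) (out : Int) : Prop := out = func_alt a b
instance (a : Int) (b : Int) (out : Int) : Decidable (Spec_func a b out) := by unfold Spec_func; infer_instance

-- ===== CLAIM (what is proved, stated in full; the proofs are below) =====
def Claim_equal_func : Prop := ∀ (a : Int) (b : Int), Dom_func a b → Spec_func a b (func a b)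

-- ===== LEMMAS AND PROOFS =====

theorem funcGo_eq_loop (n : Nat) (a b : Int) : funcGo n a b = funcLoop n (a, b) := by
  induction n generalizing a b with
  | zero => rfl
  | succ n ih =>
    simp only [funcGo, funcLoop]
    have h3 : (0:Int) < 3 := by norm_num
    rw [PySem.Int.floordiv_eq_ediv_of_pos h3, PySem.Int.mod_eq_emod_of_pos h3]
    have hlo : 0 ≤ (a + b) % 3 := Int.emod_nonneg _ (by norm_num)
    have hhi : (a + b) % 3 < 3 := Int.emod_lt_of_pos _ h3
    have hc1 : ((a + b) / 3 + (a + b) % 3 = 2 ∨ (a + b) / 3 + (a + b) % 3 = 3)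
        ↔ (a + b = 2 ∨ (4 ≤ a + b ∧ a + b ≤ 7) ∨ a + b = 9) := by omega
    have hc2 : ((a + b) / 3 + (a + b) % 3 > 3) ↔ (a + b = 8 ∨ a + b ≥ 10) := by omega
    rw [if_congr hc1 rfl rfl, if_congr hc2 rfl rfl]
    split
    · rfl
    · split
      · exact ih b _
      · rfl

-- ===== VERDICT (by name: the statement is the Claim_ definition above) =====
theorem func_spec : Claim_equal_func := by
  intro a b _
  unfold Spec_func func func_alt
  exact funcGo_eq_loop 200 a b
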